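-- pv_equiv track=rewrite | github.com/saltymermaid/aoc_2024 | advent4a.py | get_all_groups
-- ===== SOURCE A (Python) =====
-- def get_all_groups(grid):
--     width = len(grid[0])
--     height = len(grid)
--     groups = []
--     groups.extend(grid + [row[::-1] for row in grid])
--     columns = list(zip(*grid))
--     groups.extend(columns + [col[::-1] for col in columns])
--     for direction in [True, False]:
--         # Top row
--         for i in range(width):
--             diag = get_diag(0, i, grid, direction)
--             groups.extend([diag, diag[::-1]])
--
--         # Left/right column (skip first row as it's covered)
--         start_col = 0 if direction else width - 1
--         for i in range(1, height):
--             diag = get_diag(i, start_col, grid, direction)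
--             groups.extend([diag, diag[::-1]])
--     return groups
--
-- def get_diag(row, col, grid, right = True):
--     height, width = len(grid), len(grid[0])
--     diag = []
--     while 0 <= row < height and 0 <= col < width:
--         diag.append(grid[row][col])
--         row += 1
--         col = col + 1 if right else col - 1
--     return diag
-- ===== SOURCE B (Python) =====
-- def get_all_groups(grid):
--     width, height = len(grid[0]), len(grid)
--     columns = list(zip(*grid))
--
--     def diag(k, right):
--         # diagonal keyed by k = c - r (right) or k = c + r (left), scanned by row
--         if right:
--             return [grid[r][k + r] for r in range(height) if 0 <= k + r < width]
--         return [grid[r][k - r] for r in range(height) if 0 <= k - r < width]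
--
--     right_keys = list(range(width)) + [-i for i in range(1, height)]
--     left_keys = list(range(width)) + [width - 1 + i for i in range(1, height)]
--     diags = [diag(k, True) for k in right_keys] + [diag(k, False) for k in left_keys]
--
--     out = list(grid) + [row[::-1] for row in grid]
--     out += columns + [col[::-1] for col in columns]
--     for d in diags:
--         out += [d, d[::-1]]
--     return out
-- ===== Notes on version B (the rewrite author's own statement) =====
-- stated objective: simpler
-- what changed: A extracts each diagonal with a boundary-testing while-loop that walks two mutable coordinates; B instead computes each diagonal by its key (c-r for down-right, c+r for down-left) as a single row-indexed filtered comprehension, and assembles the whole result as one concatenation over the key lists instead of nested extend loops.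
import Mathlib
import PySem

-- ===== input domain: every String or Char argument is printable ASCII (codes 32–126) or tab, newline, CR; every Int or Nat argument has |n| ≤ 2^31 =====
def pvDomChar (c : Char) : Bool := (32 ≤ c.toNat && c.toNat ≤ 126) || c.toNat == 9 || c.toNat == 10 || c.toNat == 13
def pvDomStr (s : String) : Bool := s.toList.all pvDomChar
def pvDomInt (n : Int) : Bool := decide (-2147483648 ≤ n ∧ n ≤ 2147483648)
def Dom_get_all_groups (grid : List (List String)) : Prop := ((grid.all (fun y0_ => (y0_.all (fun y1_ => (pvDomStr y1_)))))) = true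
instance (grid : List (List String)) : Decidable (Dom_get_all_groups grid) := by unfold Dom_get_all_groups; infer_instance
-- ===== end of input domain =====

-- B replaces A's per-diagonal boundary-walking while-loop by per-key row-indexed
-- comprehensions (one filtered scan over row indices per diagonal key): simpler, same cost.

-- grid[r][c] with in-range indices (both Pythons use this raw access; raising cases are outside Pre_)
def pvCell (grid : List (List String)) (r c : Int) : String :=
  (PySem.List.pyGet? ((PySem.List.pyGet? grid r).getD []) c).getD ""

-- list(zip(*grid)): transpose truncated to the shortest row (both Pythons call zip(*grid))
def pyZipStar (grid : List (List String)) : List (List String) :=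
  let m := ((grid.map List.length).min?).getD 0
  (List.range m).map (fun c => grid.map (fun row => (PySem.List.pyGet? row (c : Int)).getD ""))

-- ===== PORT A =====
-- helper get_diag: the while-loop walking the diagonal from (row, col)
def get_diag (row col : Int) (grid : List (List String)) (right : Bool) : List String :=
  if h : 0 ≤ row ∧ row < (grid.length : Int) ∧ 0 ≤ col ∧
      col < (((PySem.List.pyGet? grid 0).getD []).length : Int) then
    pvCell grid row col :: get_diag (row + 1) (if right then col + 1 else col - 1) grid right
  else []
termination_by ((grid.length : Int) - row).toNat
decreasing_by omega

def get_all_groups (grid : List (List String)) : List (List String) :=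
  let width : Int := ((PySem.List.pyGet? grid 0).getD []).length
  let height : Int := grid.length
  let groups : List (List String) := []
  let groups := groups ++ (grid ++ grid.map List.reverse)
  let columns := pyZipStar grid
  let groups := groups ++ (columns ++ columns.map List.reverse)
  [true, false].foldl (fun groups direction =>
    let groups := (PySem.List.pyRange 0 width 1).foldl (fun gs i =>
      let diag := get_diag 0 i grid direction
      gs ++ [diag, diag.reverse]) groups
    let start_col : Int := if direction then 0 else width - 1
    (PySem.List.pyRange 1 height 1).foldl (fun gs i =>
      let diag := get_diag i start_col grid direction
      gs ++ [diag, diag.reverse]) groups) groups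

-- ===== PORT B =====
-- diagonal keyed by k = c - r (right) or k = c + r (left), scanned by row index
def pvDiagB (grid : List (List String)) (k : Int) (right : Bool) : List String :=
  let width : Int := ((PySem.List.pyGet? grid 0).getD []).length
  let height : Int := grid.length
  if right then
    (PySem.List.pyRange 0 height 1).filterMap (fun r =>
      if 0 ≤ k + r ∧ k + r < width then some (pvCell grid r (k + r)) else none)
  else
    (PySem.List.pyRange 0 height 1).filterMap (fun r =>
      if 0 ≤ k - r ∧ k - r < width then some (pvCell grid r (k - r)) else none)

def get_all_groups_alt (grid : List (List String)) : List (List String) :=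
  let width : Int := ((PySem.List.pyGet? grid 0).getD []).length
  let height : Int := grid.length
  let columns := pyZipStar grid
  let right_keys := PySem.List.pyRange 0 width 1 ++
    (PySem.List.pyRange 1 height 1).map (fun i => -i)
  let left_keys := PySem.List.pyRange 0 width 1 ++
    (PySem.List.pyRange 1 height 1).map (fun i => width - 1 + i)
  let diags := right_keys.map (fun k => pvDiagB grid k true) ++
    left_keys.map (fun k => pvDiagB grid k false)
  let out := (grid ++ grid.map List.reverse) ++ (columns ++ columns.map List.reverse)
  diags.foldl (fun gs d => gs ++ [d, d.reverse]) out

-- ===== PRECONDITION & SPEC =====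
-- Pre_ excludes exactly the inputs where Python A raises IndexError: the empty grid
-- (grid[0]) and grids with a row shorter than the first row (get_diag's grid[row][col]).
def Pre_get_all_groups (grid : List (List String)) : Prop :=
  grid ≠ [] ∧ ∀ row ∈ grid, (grid.headI).length ≤ row.length
instance (grid : List (List String)) : Decidable (Pre_get_all_groups grid) := by
  unfold Pre_get_all_groups; infer_instance

def pvWitness_get_all_groups : List (List String) :=
  [["a", "b"], ["c", "d"], ["e", "f"]]

def Spec_get_all_groups (grid : List (List String)) (out : List (List String)) : Prop := out = get_all_groups_alt grid
instance (grid : List (List String)) (out : List (List String)) : Decidable (Spec_get_all_groups grid out) := by unfold Spec_get_all_groups; infer_instance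

-- ===== CLAIM (what is proved, stated in full; the proofs are below) =====
def Claim_equal_get_all_groups : Prop := ∀ (grid : List (List String)), Dom_get_all_groups grid → Pre_get_all_groups grid → Spec_get_all_groups grid (get_all_groups grid)

-- ===== LEMMAS AND PROOFS =====

-- the width A and B measure: len(grid[0])
def pvW (grid : List (List String)) : Int :=
  ((PySem.List.pyGet? grid 0).getD []).length

theorem pv_flatMap_congr {a b : Type} (l : List a) (f g : a → List b)
    (h : ∀ x ∈ l, f x = g x) : l.flatMap f = l.flatMap g := by
  simp only [List.flatMap]
  exact congrArg List.flatten (List.map_congr_left h)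

-- A's right-going walk from (s, k+s) equals the row-filtered comprehension over rows s..s+m
theorem pv_walk_right (grid : List (List String)) :
    ∀ (m s : ℕ) (k : Int), s + m = grid.length → 0 ≤ k + (s : Int) →
    get_diag s (k + s) grid true =
      (List.range' s m).filterMap (fun r : ℕ =>
        if 0 ≤ k + (r : Int) ∧ k + (r : Int) < pvW grid then
          some (pvCell grid r (k + r)) else none) := by
  intro m
  induction m with
  | zero =>
    intro s k hs hk
    rw [get_diag, dif_neg]
    · simp
    · intro h; have := h.2.1; omega
  | succ m ih =>
    intro s k hs hk
    rw [get_diag]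
    by_cases hw : k + (s : Int) < pvW grid
    · rw [dif_pos ⟨by omega, by omega, hk, hw⟩]
      have hif : (if true = true then k + (s : Int) + 1 else k + (s : Int) - 1) = k + (s : Int) + 1 := rfl
      rw [hif, List.range'_succ, List.filterMap_cons]
      rw [if_pos ⟨hk, hw⟩]
      have hc1 : (s : Int) + 1 = ((s + 1 : ℕ) : Int) := by push_cast; ring
      have hc2 : k + (s : Int) + 1 = k + ((s + 1 : ℕ) : Int) := by push_cast; ring
      rw [hc1, hc2, ih (s + 1) k (by omega) (by push_cast; omega)]
    · rw [dif_neg (by intro h; exact hw h.2.2.2)]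
      symm
      rw [List.filterMap_eq_nil_iff]
      intro r hr
      rw [List.mem_range'_1] at hr
      rw [if_neg]
      intro h
      have h1 : (s : Int) ≤ (r : Int) := by exact_mod_cast hr.1
      have := h.2
      omega

-- A's left-going walk from (s, k-s) equals the row-filtered comprehension over rows s..s+m
theorem pv_walk_left (grid : List (List String)) :
    ∀ (m s : ℕ) (k : Int), s + m = grid.length → k - (s : Int) < pvW grid →
    get_diag s (k - s) grid false =
      (List.range' s m).filterMap (fun r : ℕ =>
        if 0 ≤ k - (r : Int) ∧ k - (r : Int) < pvW grid then
          some (pvCell grid r (k - r)) else none) := by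
  intro m
  induction m with
  | zero =>
    intro s k hs hk
    rw [get_diag, dif_neg]
    · simp
    · intro h; have := h.2.1; omega
  | succ m ih =>
    intro s k hs hk
    rw [get_diag]
    by_cases hw : 0 ≤ k - (s : Int)
    · rw [dif_pos ⟨by omega, by omega, hw, hk⟩]
      have hif : (if false = true then k - (s : Int) + 1 else k - (s : Int) - 1) = k - (s : Int) - 1 := rfl
      rw [hif, List.range'_succ, List.filterMap_cons]
      rw [if_pos ⟨hw, hk⟩]
      have hc1 : (s : Int) + 1 = ((s + 1 : ℕ) : Int) := by push_cast; ring
      have hc2 : k - (s : Int) - 1 = k - ((s + 1 : ℕ) : Int) := by push_cast; ring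
      rw [hc1, hc2, ih (s + 1) k (by omega) (by push_cast; omega)]
    · rw [dif_neg (by intro h; exact hw h.2.2.1)]
      symm
      rw [List.filterMap_eq_nil_iff]
      intro r hr
      rw [List.mem_range'_1] at hr
      rw [if_neg]
      intro h
      have h1 : (s : Int) ≤ (r : Int) := by exact_mod_cast hr.1
      have := h.1
      omega

-- B's pyRange-based comprehension as a Nat range' filterMap
theorem pvDiagB_eq_range' (grid : List (List String)) (k : Int) (right : Bool) :
    pvDiagB grid k right =
      (List.range' 0 grid.length).filterMap (fun r : ℕ =>
        if right then
          (if 0 ≤ k + (r : Int) ∧ k + (r : Int) < pvW grid then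
            some (pvCell grid r (k + r)) else none)
        else
          (if 0 ≤ k - (r : Int) ∧ k - (r : Int) < pvW grid then
            some (pvCell grid r (k - r)) else none)) := by
  have hr : PySem.List.pyRange 0 (grid.length : Int) 1 =
      (List.range' 0 grid.length).map (fun r : ℕ => (r : Int)) := by
    rw [PySem.List.pyRange_one]
    simp [List.range_eq_range']
  cases right <;>
    simp only [pvDiagB, if_true, if_false, Bool.false_eq_true, pvW, hr, List.filterMap_map,
      Function.comp] <;> rfl

theorem pv_diag_top_right (grid : List (List String)) (i : Int) (_h0 : 0 ≤ i) :
    get_diag 0 i grid true = pvDiagB grid i true := by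
  rw [pvDiagB_eq_range' grid i true]
  have h := pv_walk_right grid grid.length 0 i (by omega) (by push_cast; omega)
  simp only [Nat.cast_zero, add_zero] at h
  rw [h]
  exact List.filterMap_congr (fun r _ => by simp)

theorem pv_diag_left_col_right (grid : List (List String)) (i : Int)
    (h1 : 1 ≤ i) (h2 : i < grid.length) :
    get_diag i 0 grid true = pvDiagB grid (-i) true := by
  rw [pvDiagB_eq_range' grid (-i) true]
  have hsplit : List.range' 0 grid.length =
      List.range' 0 i.toNat ++ List.range' i.toNat (grid.length - i.toNat) := by
    have := @List.range'_append 0 i.toNat (grid.length - i.toNat) 1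
    simp only [one_mul, zero_add] at this
    rw [this, Nat.add_sub_cancel' (by omega)]
  rw [hsplit, List.filterMap_append]
  have hpre : List.filterMap (fun r : ℕ =>
      if true then
        (if 0 ≤ -i + (r : Int) ∧ -i + (r : Int) < pvW grid then
          some (pvCell grid r (-i + r)) else none)
      else
        (if 0 ≤ -i - (r : Int) ∧ -i - (r : Int) < pvW grid then
          some (pvCell grid r (-i - r)) else none)) (List.range' 0 i.toNat) = [] := by
    rw [List.filterMap_eq_nil_iff]
    intro r hr
    rw [List.mem_range'_1] at hr
    simp only [if_true]
    rw [if_neg]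
    intro h
    have h1' : (r : Int) < i := by omega
    have := h.1
    omega
  rw [hpre, List.nil_append]
  have h := pv_walk_right grid (grid.length - i.toNat) i.toNat (-i) (by omega) (by omega)
  have hci : ((i.toNat : ℕ) : Int) = i := by omega
  rw [hci] at h
  simp only [neg_add_cancel] at h
  rw [h]
  exact List.filterMap_congr (fun r _ => by simp)

theorem pv_diag_top_left (grid : List (List String)) (i : Int)
    (_h0 : 0 ≤ i) (h1 : i < pvW grid) :
    get_diag 0 i grid false = pvDiagB grid i false := by
  rw [pvDiagB_eq_range' grid i false]
  have h := pv_walk_left grid grid.length 0 i (by omega) (by push_cast; omega)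
  simp only [Nat.cast_zero, sub_zero] at h
  rw [h]
  exact List.filterMap_congr (fun r _ => by simp)

theorem pv_diag_right_col_left (grid : List (List String)) (i : Int)
    (h1 : 1 ≤ i) (h2 : i < grid.length) :
    get_diag i (pvW grid - 1) grid false = pvDiagB grid (pvW grid - 1 + i) false := by
  rw [pvDiagB_eq_range' grid (pvW grid - 1 + i) false]
  have hsplit : List.range' 0 grid.length =
      List.range' 0 i.toNat ++ List.range' i.toNat (grid.length - i.toNat) := by
    have := @List.range'_append 0 i.toNat (grid.length - i.toNat) 1
    simp only [one_mul, zero_add] at this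
    rw [this, Nat.add_sub_cancel' (by omega)]
  rw [hsplit, List.filterMap_append]
  have hpre : List.filterMap (fun r : ℕ =>
      if false then
        (if 0 ≤ pvW grid - 1 + i + (r : Int) ∧ pvW grid - 1 + i + (r : Int) < pvW grid then
          some (pvCell grid r (pvW grid - 1 + i + r)) else none)
      else
        (if 0 ≤ pvW grid - 1 + i - (r : Int) ∧ pvW grid - 1 + i - (r : Int) < pvW grid then
          some (pvCell grid r (pvW grid - 1 + i - r)) else none)) (List.range' 0 i.toNat) = [] := by
    rw [List.filterMap_eq_nil_iff]
    intro r hr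
    rw [List.mem_range'_1] at hr
    simp only [Bool.false_eq_true, if_false]
    rw [if_neg]
    intro h
    have h1' : (r : Int) < i := by omega
    have := h.2
    omega
  rw [hpre, List.nil_append]
  have h := pv_walk_left grid (grid.length - i.toNat) i.toNat (pvW grid - 1 + i) (by omega) (by omega)
  have hci : ((i.toNat : ℕ) : Int) = i := by omega
  rw [hci] at h
  have hc : pvW grid - 1 + i - i = pvW grid - 1 := by ring
  rw [hc] at h
  rw [h]
  exact List.filterMap_congr (fun r _ => by simp)

-- ===== VERDICT (by name: the statement is the Claim_ definition above) =====
theorem get_all_groups_spec : Claim_equal_get_all_groups := by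
  intro grid _hdom _hpre
  unfold Spec_get_all_groups
  show get_all_groups grid = get_all_groups_alt grid
  simp only [get_all_groups, get_all_groups_alt, List.foldl_cons, List.foldl_nil,
    if_true, if_false, Bool.false_eq_true, List.nil_append,
    PySem.List.foldl_append_eq_flatMap, List.flatMap_append, List.flatMap_map,
    List.map_append, List.append_assoc]
  refine congrArg _ (congrArg _ (congrArg _ (congrArg _ ?_)))
  have e1 := pv_flatMap_congr
      (PySem.List.pyRange 0 (((PySem.List.pyGet? grid 0).getD []).length : Int))
      (fun x => [get_diag 0 x grid true, (get_diag 0 x grid true).reverse])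
      (fun a => [pvDiagB grid a true, (pvDiagB grid a true).reverse])
      (fun i hi => by
        rw [PySem.List.mem_pyRange_one] at hi
        beta_reduce
        rw [pv_diag_top_right grid i hi.1])
  have e2 := pv_flatMap_congr (PySem.List.pyRange 1 (grid.length : Int))
      (fun x => [get_diag x 0 grid true, (get_diag x 0 grid true).reverse])
      (fun a => [pvDiagB grid (-a) true, (pvDiagB grid (-a) true).reverse])
      (fun i hi => by
        rw [PySem.List.mem_pyRange_one] at hi
        beta_reduce
        rw [pv_diag_left_col_right grid i hi.1 hi.2])
  have e3 := pv_flatMap_congr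
      (PySem.List.pyRange 0 (((PySem.List.pyGet? grid 0).getD []).length : Int))
      (fun x => [get_diag 0 x grid false, (get_diag 0 x grid false).reverse])
      (fun a => [pvDiagB grid a false, (pvDiagB grid a false).reverse])
      (fun i hi => by
        rw [PySem.List.mem_pyRange_one] at hi
        beta_reduce
        rw [pv_diag_top_left grid i hi.1 (show i < pvW grid from hi.2)])
  have e4 := pv_flatMap_congr (PySem.List.pyRange 1 (grid.length : Int))
      (fun x => [get_diag x ((((PySem.List.pyGet? grid 0).getD []).length : Int) - 1) grid false,
        (get_diag x ((((PySem.List.pyGet? grid 0).getD []).length : Int) - 1) grid false).reverse])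
      (fun a => [pvDiagB grid ((((PySem.List.pyGet? grid 0).getD []).length : Int) - 1 + a) false,
        (pvDiagB grid ((((PySem.List.pyGet? grid 0).getD []).length : Int) - 1 + a) false).reverse])
      (fun i hi => by
        rw [PySem.List.mem_pyRange_one] at hi
        beta_reduce
        show [get_diag i (pvW grid - 1) grid false, (get_diag i (pvW grid - 1) grid false).reverse] =
          [pvDiagB grid (pvW grid - 1 + i) false, (pvDiagB grid (pvW grid - 1 + i) false).reverse]
        rw [pv_diag_right_col_left grid i hi.1 hi.2])
  rw [e1, e2, e3, e4]
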